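-- pv_equiv track=rewrite | github.com/PaddlePaddle/PaddleOCR | unstructured_paddleocr/ppstructure/table/table_master_match.py | get_match_dict
-- ===== SOURCE A (Python) =====
-- def get_match_dict(match_list):
--     """
--     Convert match_list to a dict, where key is master bbox's index, value is end2end bbox index.
--     :param match_list:
--     :return:
--     """
--     match_dict = dict()
--     for match_pair in match_list:
--         end2end_index, master_index = match_pair[0], match_pair[1]
--         if master_index not in match_dict.keys():
--             match_dict[master_index] = [end2end_index]
--         else:
--             match_dict[master_index].append(end2end_index)
--     return match_dict
-- ===== SOURCE B (Python) =====
-- def get_match_dict(match_list):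
--     """
--     Convert match_list to a dict, where key is master bbox's index, value is end2end bbox index.
--     :param match_list:
--     :return:
--     """
--     keys = list(dict.fromkeys(m for _, m in match_list))
--     return {k: [e for e, m in match_list if m == k] for k in keys}
-- ===== Notes on version B (the rewrite author's own statement) =====
-- stated objective: alternative
-- what changed: Replaces the incremental dict-building pass (insert-or-append per pair) by a two-phase decomposition: first deduplicate the master indices in first-occurrence order, then build each group's value list with one filtering comprehension per key.
import Mathlib
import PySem

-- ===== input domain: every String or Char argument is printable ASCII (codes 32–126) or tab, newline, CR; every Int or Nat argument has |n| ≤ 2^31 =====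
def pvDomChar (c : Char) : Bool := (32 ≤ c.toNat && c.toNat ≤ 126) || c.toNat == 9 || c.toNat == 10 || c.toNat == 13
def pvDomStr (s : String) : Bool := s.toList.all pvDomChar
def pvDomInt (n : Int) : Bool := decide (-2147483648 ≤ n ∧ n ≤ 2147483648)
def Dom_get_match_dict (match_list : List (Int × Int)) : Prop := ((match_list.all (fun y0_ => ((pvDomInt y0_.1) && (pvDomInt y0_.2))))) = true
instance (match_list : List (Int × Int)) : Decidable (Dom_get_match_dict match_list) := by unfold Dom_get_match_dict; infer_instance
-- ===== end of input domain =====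

-- ===== PORT A =====
-- B groups by a dedup-in-first-occurrence-order key list plus one filtering pass per key,
-- instead of A's single incremental insert-or-append dict pass (objective: alternative).
def get_match_dict (match_list : List (Int × Int)) : List (Int × List Int) :=
  (match_list.foldl (fun match_dict match_pair =>
      let end2end_index := match_pair.1
      let master_index := match_pair.2
      if !(match_dict.contains master_index) then
        match_dict.insert master_index [end2end_index]
      else
        match_dict.modify master_index [] (· ++ [end2end_index]))
    (PySem.Dict.empty : PySem.Dict Int (List Int))).items

-- ===== PORT B =====
def get_match_dict_alt (match_list : List (Int × Int)) : List (Int × List Int) :=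
  let keys := PySem.Set.ofList (match_list.map Prod.snd)
  keys.map (fun k => (k, (match_list.filter (fun p => p.2 == k)).map Prod.fst))

-- ===== PRECONDITION & SPEC =====
def Spec_get_match_dict (match_list : List (Int × Int)) (out : List (Int × List Int)) : Prop := out = get_match_dict_alt match_list
instance (match_list : List (Int × Int)) (out : List (Int × List Int)) : Decidable (Spec_get_match_dict match_list out) := by unfold Spec_get_match_dict; infer_instance

-- ===== CLAIM (what is proved, stated in full; the proofs are below) =====
def Claim_equal_get_match_dict : Prop := ∀ (match_list : List (Int × Int)), Dom_get_match_dict match_list → Spec_get_match_dict match_list (get_match_dict match_list)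

-- ===== LEMMAS AND PROOFS =====

-- inserting a missing key equals a modify with default
theorem pv_ins_eq_mod {κ ν : Type} [BEq κ] [LawfulBEq κ] (d : PySem.Dict κ ν) (k : κ) (v0 : ν) (f : ν → ν)
    (h : d.contains k = false) : d.insert k (f v0) = d.modify k v0 f := by
  have hg : d.getD k v0 = v0 := PySem.Dict.getD_of_not_contains d v0 h
  simp [PySem.Dict.modify, PySem.Dict.insert, hg]

-- A's loop body is pointwise a plain modify-with-default
theorem pv_step_eq (d : PySem.Dict Int (List Int)) (p : Int × Int) :
    (let e := p.1; let m := p.2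
     if !(d.contains m) then d.insert m [e] else d.modify m [] (· ++ [e]))
    = d.modify p.2 [] (· ++ [p.1]) := by
  by_cases h : d.contains p.2
  · simp [h]
  · have h' : d.contains p.2 = false := by simpa using h
    have := pv_ins_eq_mod d p.2 ([] : List Int) (· ++ [p.1]) h'
    simpa [h'] using this

-- the modify-fold's items are exactly B's grouped list
theorem pv_fold_items (l : List (Int × Int)) :
    (l.foldl (fun d p => d.modify p.2 [] (· ++ [p.1])) (PySem.Dict.empty : PySem.Dict Int (List Int))).items
    = (PySem.Set.ofList (l.map Prod.snd)).map (fun k => (k, (l.filter (fun p => p.2 == k)).map Prod.fst)) := by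
  have hswap : ∀ (d : PySem.Dict Int (List Int)),
      l.foldl (fun d p => d.modify p.2 [] (· ++ [p.1])) d
      = (l.map Prod.swap).foldl (fun d p => d.modify p.1 [] (· ++ [p.2])) d := by
    intro d; rw [List.foldl_map]; simp
  rw [PySem.Dict.items_eq_map_keys _ ?nd ([] : List Int)]
  case nd => exact PySem.Dict.nodup_keys_foldl_modify_key l Prod.snd [] (fun d x => (· ++ [x.1])) _ (by simp [PySem.Dict.keys_empty])
  · rw [PySem.Dict.keys_foldl_modify_key]
    apply List.map_congr_left
    intro k hk
    rw [hswap, PySem.Dict.getD_foldl_modify_append]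
    simp [List.filter_map, Function.comp_def]

-- ===== VERDICT (by name: the statement is the Claim_ definition above) =====
theorem get_match_dict_spec : Claim_equal_get_match_dict := by
  intro l _
  unfold Spec_get_match_dict get_match_dict get_match_dict_alt
  have hfold : l.foldl (fun match_dict match_pair =>
      let end2end_index := match_pair.1
      let master_index := match_pair.2
      if !(match_dict.contains master_index) then
        match_dict.insert master_index [end2end_index]
      else
        match_dict.modify master_index [] (· ++ [end2end_index]))
      (PySem.Dict.empty : PySem.Dict Int (List Int))
      = l.foldl (fun d p => d.modify p.2 [] (· ++ [p.1])) PySem.Dict.empty := by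
    have hfun : (fun (match_dict : PySem.Dict Int (List Int)) (match_pair : Int × Int) =>
      let end2end_index := match_pair.1
      let master_index := match_pair.2
      if !(match_dict.contains master_index) then
        match_dict.insert master_index [end2end_index]
      else
        match_dict.modify master_index [] (· ++ [end2end_index]))
      = (fun d p => d.modify p.2 [] (· ++ [p.1])) :=
      funext fun d => funext fun p => pv_step_eq d p
    rw [hfun]
  rw [hfold, pv_fold_items]
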